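-- pv_equiv track=rewrite | github.com/pymongo/python_leetcode | dp/largest_divisible_subset.py | recipe
-- ===== SOURCE A (Python) =====
-- from typing import List
--
-- def recipe(nums: List[int]) -> List[int]:
--     n = len(nums)
--     if n == 0:
--         return []
--
--     dp = [1] * n
--     prev = [-1] * n
--
--     max_len = 1
--     max_i = 0
--     for i in range(n):
--         for j in range(i):
--             if nums[i] % nums[j] == 0:
--                 if dp[j] + 1 > dp[i]:
--                     dp[i] = dp[j] + 1
--                     prev[i] = j
--                     if dp[i] > max_len:
--                         max_len = dp[i]
--                         max_i = i
--
--     # 还原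
--     i = max_i
--     res = []
--     # 如果没到子集长度为1的点(也就是终点)
--     while dp[i] != 1:
--         res.insert(0, nums[i])
--         i = prev[i]
--     res.insert(0, nums[i])
--     return res
-- ===== SOURCE B (Python) =====
-- from typing import List
--
-- def recipe(nums: List[int]) -> List[int]:
--     best = []
--     ans = []
--     for i, x in enumerate(nums):
--         pick = -1
--         plen = 0
--         for j in range(i):
--             if x % nums[j] == 0 and len(best[j]) > plen:
--                 pick = j
--                 plen = len(best[j])
--         cur = best[pick] + [x] if pick >= 0 else [x]
--         best.append(cur)
--         if len(cur) > len(ans):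
--             ans = cur
--     return ans
-- ===== Notes on version B (the rewrite author's own statement) =====
-- stated objective: simpler
-- what changed: Replaces A's prev-pointer array and separate backward reconstruction loop by a single DP pass that stores the full best divisible chain ending at each index (picking the first longest divisible predecessor) and tracks the running best chain as it goes.
import Mathlib
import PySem

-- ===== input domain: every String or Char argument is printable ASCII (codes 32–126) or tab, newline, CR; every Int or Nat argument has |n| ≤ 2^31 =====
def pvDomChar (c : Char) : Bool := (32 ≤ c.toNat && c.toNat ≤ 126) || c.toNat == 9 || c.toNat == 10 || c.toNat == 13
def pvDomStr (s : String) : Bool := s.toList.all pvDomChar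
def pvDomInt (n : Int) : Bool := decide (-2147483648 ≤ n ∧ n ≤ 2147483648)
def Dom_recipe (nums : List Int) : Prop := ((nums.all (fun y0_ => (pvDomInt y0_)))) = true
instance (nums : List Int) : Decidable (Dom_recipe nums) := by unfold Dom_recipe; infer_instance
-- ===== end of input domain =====

-- B replaces A's prev-pointer array and backward reconstruction loop by storing full chains per index; objective: simpler (one pass, no reconstruction).

-- ===== PORT A =====
-- inner loop body: for j in range(i): if nums[i] % nums[j] == 0: if dp[j]+1 > dp[i]: ...
def recipeStepA (nums : List Int) (i : Nat) (st : List Int × List Int × Int × Nat) (j : Nat) :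
    List Int × List Int × Int × Nat :=
  if PySem.Int.mod (nums.getD i 0) (nums.getD j 0) = 0 then
    if st.1.getD j 0 + 1 > st.1.getD i 0 then
      let dp' := st.1.set i (st.1.getD j 0 + 1)
      let prev' := st.2.1.set i ((j : Nat) : Int)
      if dp'.getD i 0 > st.2.2.1 then (dp', prev', dp'.getD i 0, i)
      else (dp', prev', st.2.2.1, st.2.2.2)
    else st
  else st

def recipeOuterA (nums : List Int) (st : List Int × List Int × Int × Nat) (i : Nat) :
    List Int × List Int × Int × Nat :=
  (List.range i).foldl (recipeStepA nums i) st

-- while dp[i] != 1: res.insert(0, nums[i]); i = prev[i]  — fuel-guarded (fuel n always suffices: prev pointers strictly decrease)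
def recipeRebuild (dp prevs nums : List Int) : Nat → Nat → List Int → List Int
  | 0, i, res => nums.getD i 0 :: res
  | f + 1, i, res =>
    if dp.getD i 0 ≠ 1 then recipeRebuild dp prevs nums f (prevs.getD i 0).toNat (nums.getD i 0 :: res)
    else nums.getD i 0 :: res

def recipe (nums : List Int) : List Int :=
  if nums.length = 0 then []
  else
    let st := (List.range nums.length).foldl (recipeOuterA nums)
      (List.replicate nums.length 1, List.replicate nums.length (-1), 1, 0)
    recipeRebuild st.1 st.2.1 nums nums.length st.2.2.2 []

-- ===== PORT B =====
-- inner loop body of Source B: if x % nums[j] == 0 and len(best[j]) > plen: pick, plen = j, len(best[j])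
def recipeStepB (nums : List Int) (best : List (List Int)) (x : Int) (st : Int × Nat) (j : Nat) :
    Int × Nat :=
  if PySem.Int.mod x (nums.getD j 0) = 0 ∧ (best.getD j []).length > st.2 then
    ((j : Int), (best.getD j []).length)
  else st

def recipeOuterB (nums : List Int) (st : List (List Int) × List Int) (p : Int × Int) :
    List (List Int) × List Int :=
  let pk := (List.range p.1.toNat).foldl (recipeStepB nums st.1 p.2) (-1, 0)
  let cur := if pk.1 ≥ 0 then st.1.getD pk.1.toNat [] ++ [p.2] else [p.2]
  (st.1 ++ [cur], if cur.length > st.2.length then cur else st.2)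

def recipe_alt (nums : List Int) : List Int :=
  ((PySem.List.enumerate nums 0).foldl (recipeOuterB nums) ([], [])).2

-- ===== PRECONDITION & SPEC =====
-- Pre_ excludes exactly the inputs on which Python A raises ZeroDivisionError: a zero anywhere
-- before the last element is used as a modulus nums[j] by some later i.
def Pre_recipe (nums : List Int) : Prop := ∀ x ∈ nums.dropLast, x ≠ 0
instance (nums : List Int) : Decidable (Pre_recipe nums) := by unfold Pre_recipe; infer_instance
def pvWitness_recipe : List Int := [1, 2, 4, 3]
def Spec_recipe (nums : List Int) (out : List Int) : Prop := out = recipe_alt nums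
instance (nums : List Int) (out : List Int) : Decidable (Spec_recipe nums out) := by unfold Spec_recipe; infer_instance

-- ===== CLAIM (what is proved, stated in full; the proofs are below) =====
def Claim_equal_recipe : Prop := ∀ (nums : List Int), Dom_recipe nums → Pre_recipe nums → Spec_recipe nums (recipe nums)

-- ===== LEMMAS AND PROOFS =====

theorem pvGetD_set_ne {α : Type} (l : List α) (k m : Nat) (v d : α) (h : m ≠ k) :
    (l.set k v).getD m d = l.getD m d := by
  simp [List.getD, Ne.symm h]

theorem pvGetD_set_eq {α : Type} (l : List α) (k : Nat) (v d : α) (h : k < l.length) :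
    (l.set k v).getD k d = v := by
  simp [List.getD, h]

theorem pvGetD_append_lt {α : Type} (l1 l2 : List α) (m : Nat) (d : α) (h : m < l1.length) :
    (l1 ++ l2).getD m d = l1.getD m d := by
  simp [List.getD, List.getElem?_append_left h]

theorem pvGetD_append_len {α : Type} (l1 : List α) (x d : α) :
    (l1 ++ [x]).getD l1.length d = x := by
  simp [List.getD]

theorem pvTake_succ (l : List Int) (n : Nat) (h : n < l.length) :
    l.take (n + 1) = l.take n ++ [l[n]] := by
  rw [List.take_add_one, List.getElem?_eq_getElem h]; rfl

-- structural invariant: each stored chain is either a singleton or extends the chain of its prev pointer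
def pvGood (nums dp prevs : List Int) (best : List (List Int)) (m : Nat) : Prop :=
  (dp.getD m 0 = 1 ∧ best.getD m [] = [nums.getD m 0]) ∨
  (∃ j, j < m ∧ prevs.getD m 0 = (j : Int) ∧ dp.getD m 0 = dp.getD j 0 + 1 ∧
    best.getD m [] = best.getD j [] ++ [nums.getD m 0])

theorem pvGood_ne_nil (nums dp prevs : List Int) (best : List (List Int)) (m : Nat)
    (h : pvGood nums dp prevs best m) : best.getD m [] ≠ [] := by
  rcases h with ⟨_, hb⟩ | ⟨j, _, _, _, hb⟩ <;> rw [hb] <;> simp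

theorem pvRebuild_eq (nums dp prevs : List Int) (best : List (List Int))
    (hg : ∀ m, m < best.length →
      dp.getD m 0 = ((best.getD m []).length : Int) ∧ pvGood nums dp prevs best m) :
    ∀ (fuel m : Nat) (res : List Int), m < best.length → m < fuel →
      recipeRebuild dp prevs nums fuel m res = best.getD m [] ++ res := by
  intro fuel
  induction fuel with
  | zero => intro m res _ h; omega
  | succ f ih =>
    intro m res hm hf
    obtain ⟨hdm, hgm⟩ := hg m hm
    rcases hgm with ⟨h1, hb⟩ | ⟨j, hjm, hp, hd, hb⟩
    · rw [recipeRebuild, if_neg (by omega : ¬ dp.getD m 0 ≠ 1), hb]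
      rfl
    · have hjl : j < best.length := lt_trans hjm hm
      have hdj := (hg j hjl).1
      have hne : best.getD j [] ≠ [] := pvGood_ne_nil nums dp prevs best j (hg j hjl).2
      have hlen1 : 1 ≤ (best.getD j []).length := List.length_pos_iff.mpr hne
      have hlen1' : (1 : Int) ≤ ((best.getD j []).length : Int) := by exact_mod_cast hlen1
      have hne1 : dp.getD m 0 ≠ 1 := by rw [hd, hdj]; omega
      rw [recipeRebuild, if_pos hne1, hp]
      simp only [Int.toNat_natCast]
      rw [ih j (nums.getD m 0 :: res) hjl (by omega), hb]
      simp [List.append_assoc]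

-- invariant along A's inner loop (over j) at outer index k, paired with B's chain accumulator cur
def pvInnerP (nums : List Int) (k : Nat) (dp prevs : List Int) (best : List (List Int))
    (ml : Int) (mi t : Nat) (sa : List Int × List Int × Int × Nat) (pk : Int × Nat) : Prop :=
  sa.1.length = nums.length ∧ sa.2.1.length = nums.length ∧
  (∀ m, m ≠ k → sa.1.getD m 0 = dp.getD m 0 ∧ sa.2.1.getD m 0 = prevs.getD m 0) ∧
  sa.1.getD k 0 = (pk.2 : Int) + 1 ∧
  ((sa.1.getD k 0 = 1 ∧ pk = (-1, 0)) ∨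
    (∃ j, j < t ∧ pk.1 = (j : Int) ∧ pk.2 = (best.getD j []).length ∧
      sa.2.1.getD k 0 = (j : Int) ∧ sa.1.getD k 0 = dp.getD j 0 + 1)) ∧
  (if sa.1.getD k 0 > ml then sa.2.2.1 = sa.1.getD k 0 ∧ sa.2.2.2 = k
   else sa.2.2.1 = ml ∧ sa.2.2.2 = mi)

theorem recipeStepA_pos (nums : List Int) (i j : Nat) (st : List Int × List Int × Int × Nat)
    (hc : PySem.Int.mod (nums.getD i 0) (nums.getD j 0) = 0)
    (hcond : st.1.getD j 0 + 1 > st.1.getD i 0) :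
    recipeStepA nums i st j =
      if (st.1.set i (st.1.getD j 0 + 1)).getD i 0 > st.2.2.1
      then (st.1.set i (st.1.getD j 0 + 1), st.2.1.set i ((j : Nat) : Int),
            (st.1.set i (st.1.getD j 0 + 1)).getD i 0, i)
      else (st.1.set i (st.1.getD j 0 + 1), st.2.1.set i ((j : Nat) : Int),
            st.2.2.1, st.2.2.2) := by
  unfold recipeStepA
  rw [if_pos hc, if_pos hcond]

theorem recipeStepA_id (nums : List Int) (i j : Nat) (st : List Int × List Int × Int × Nat)
    (h : ¬ (PySem.Int.mod (nums.getD i 0) (nums.getD j 0) = 0 ∧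
      st.1.getD j 0 + 1 > st.1.getD i 0)) :
    recipeStepA nums i st j = st := by
  unfold recipeStepA
  by_cases h1 : PySem.Int.mod (nums.getD i 0) (nums.getD j 0) = 0
  · rw [if_pos h1, if_neg (fun h2 => h ⟨h1, h2⟩)]
  · rw [if_neg h1]

theorem recipeStepB_pos (nums : List Int) (best : List (List Int)) (x : Int)
    (st : Int × Nat) (j : Nat)
    (h : PySem.Int.mod x (nums.getD j 0) = 0 ∧ (best.getD j []).length > st.2) :
    recipeStepB nums best x st j = ((j : Int), (best.getD j []).length) := by
  unfold recipeStepB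
  rw [if_pos h]

theorem recipeStepB_id (nums : List Int) (best : List (List Int)) (x : Int)
    (st : Int × Nat) (j : Nat)
    (h : ¬ (PySem.Int.mod x (nums.getD j 0) = 0 ∧ (best.getD j []).length > st.2)) :
    recipeStepB nums best x st j = st := by
  unfold recipeStepB
  rw [if_neg h]

theorem pvInner (nums : List Int) (k : Nat) (dp prevs : List Int) (best : List (List Int))
    (ml : Int) (mi : Nat)
    (hk : k < nums.length) (hdl : dp.length = nums.length) (hpl : prevs.length = nums.length)
    (hbl : best.length = k)
    (hlen : ∀ m, m < k → dp.getD m 0 = ((best.getD m []).length : Int))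
    (hdpk : dp.getD k 0 = 1) (hml : 1 ≤ ml) :
    ∀ t, t ≤ k → pvInnerP nums k dp prevs best ml mi t
      ((List.range t).foldl (recipeStepA nums k) (dp, prevs, ml, mi))
      ((List.range t).foldl (recipeStepB nums best (nums.getD k 0)) (-1, 0)) := by
  intro t
  induction t with
  | zero =>
    intro _
    unfold pvInnerP
    rw [List.range_zero]
    refine ⟨hdl, hpl, ?_, ?_, ?_, ?_⟩
    · intro m _
      exact ⟨rfl, rfl⟩
    · show dp.getD k 0 = (((0 : Nat) : Int)) + 1
      rw [hdpk]
      rfl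
    · exact Or.inl ⟨hdpk, rfl⟩
    · show (if dp.getD k 0 > ml then ml = dp.getD k 0 ∧ mi = k else ml = ml ∧ mi = mi)
      rw [if_neg (by omega : ¬ dp.getD k 0 > ml)]
      exact ⟨rfl, rfl⟩
  | succ t ih =>
    intro ht1
    have ht : t < k := ht1
    have IH := ih (le_of_lt ht)
    unfold pvInnerP at IH
    set sa := (List.range t).foldl (recipeStepA nums k) (dp, prevs, ml, mi) with hsa
    set pk := (List.range t).foldl (recipeStepB nums best (nums.getD k 0)) ((-1 : Int), (0 : Nat))
      with hpk
    obtain ⟨hL1, hL2, hoff, hck, hgood, hmax⟩ := IH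
    rw [List.range_succ, List.foldl_append, List.foldl_append,
      List.foldl_cons, List.foldl_nil, List.foldl_cons, List.foldl_nil, ← hsa, ← hpk]
    have hdpt : sa.1.getD t 0 = dp.getD t 0 := (hoff t (by omega)).1
    have hbt : dp.getD t 0 = ((best.getD t []).length : Int) := hlen t ht
    by_cases hc : PySem.Int.mod (nums.getD k 0) (nums.getD t 0) = 0
    · by_cases himp : (best.getD t []).length > pk.2
      · -- improvement step: both sides update
        have hcondA : sa.1.getD t 0 + 1 > sa.1.getD k 0 := by
          rw [hdpt, hbt, hck]
          omega
        rw [recipeStepA_pos nums k t sa hc hcondA, recipeStepB_pos nums best _ pk t ⟨hc, himp⟩]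
        have hkl : k < sa.1.length := by omega
        have hkl2 : k < sa.2.1.length := by omega
        have hvset : (sa.1.set k (sa.1.getD t 0 + 1)).getD k 0 = sa.1.getD t 0 + 1 :=
          pvGetD_set_eq sa.1 k _ 0 hkl
        have hcore :
            (sa.1.set k (sa.1.getD t 0 + 1)).length = nums.length ∧
            (sa.2.1.set k ((t : Nat) : Int)).length = nums.length ∧
            (∀ m, m ≠ k → (sa.1.set k (sa.1.getD t 0 + 1)).getD m 0 = dp.getD m 0 ∧
              (sa.2.1.set k ((t : Nat) : Int)).getD m 0 = prevs.getD m 0) ∧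
            (sa.1.set k (sa.1.getD t 0 + 1)).getD k 0 =
              (((best.getD t []).length : Nat) : Int) + 1 ∧
            (((sa.1.set k (sa.1.getD t 0 + 1)).getD k 0 = 1 ∧
                (((t : Nat) : Int), (best.getD t []).length) = ((-1 : Int), (0 : Nat))) ∨
              (∃ j, j < t + 1 ∧ (((t : Nat) : Int), (best.getD t []).length).1 = (j : Int) ∧
                (((t : Nat) : Int), (best.getD t []).length).2 = (best.getD j []).length ∧
                (sa.2.1.set k ((t : Nat) : Int)).getD k 0 = (j : Int) ∧
                (sa.1.set k (sa.1.getD t 0 + 1)).getD k 0 = dp.getD j 0 + 1)) := by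
          refine ⟨by simpa using hL1, by simpa using hL2, ?_, ?_, ?_⟩
          · intro m hm
            rw [pvGetD_set_ne sa.1 k m _ 0 hm, pvGetD_set_ne sa.2.1 k m _ 0 hm]
            exact hoff m hm
          · rw [hvset, hdpt, hbt]
          · refine Or.inr ⟨t, by omega, rfl, rfl, ?_, by rw [hvset, hdpt]⟩
            rw [pvGetD_set_eq sa.2.1 k _ 0 hkl2]
        by_cases hgt : (sa.1.set k (sa.1.getD t 0 + 1)).getD k 0 > sa.2.2.1
        · rw [if_pos hgt]
          obtain ⟨c1, c2, c3, c4, c5⟩ := hcore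
          refine ⟨c1, c2, c3, c4, c5, ?_⟩
          show (if (sa.1.set k (sa.1.getD t 0 + 1)).getD k 0 > ml then
            (sa.1.set k (sa.1.getD t 0 + 1)).getD k 0 = (sa.1.set k (sa.1.getD t 0 + 1)).getD k 0 ∧ k = k
            else (sa.1.set k (sa.1.getD t 0 + 1)).getD k 0 = ml ∧ k = mi)
          rw [if_pos ?_]
          · exact ⟨rfl, rfl⟩
          · rw [hvset] at hgt ⊢
            rcases (Classical.em (sa.1.getD k 0 > ml)) with h1 | h1
            · rw [if_pos h1] at hmax
              omega
            · rw [if_neg h1] at hmax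
              omega
        · rw [if_neg hgt]
          obtain ⟨c1, c2, c3, c4, c5⟩ := hcore
          refine ⟨c1, c2, c3, c4, c5, ?_⟩
          show (if (sa.1.set k (sa.1.getD t 0 + 1)).getD k 0 > ml then
            sa.2.2.1 = (sa.1.set k (sa.1.getD t 0 + 1)).getD k 0 ∧ sa.2.2.2 = k
            else sa.2.2.1 = ml ∧ sa.2.2.2 = mi)
          rw [hvset] at hgt ⊢
          rcases (Classical.em (sa.1.getD k 0 > ml)) with h1 | h1
          · rw [if_pos h1] at hmax
            omega
          · rw [if_neg h1] at hmax
            rw [if_neg (by omega)]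
            exact hmax
      · -- divisible but no improvement: both sides unchanged
        have hcondA : ¬ (sa.1.getD t 0 + 1 > sa.1.getD k 0) := by
          rw [hdpt, hbt, hck]
          omega
        rw [recipeStepA_id nums k t sa (fun h => hcondA h.2),
          recipeStepB_id nums best _ pk t (fun h => himp h.2)]
        refine ⟨hL1, hL2, hoff, hck, ?_, hmax⟩
        rcases hgood with h | ⟨j, hj, h2, h3, h4, h5⟩
        · exact Or.inl h
        · exact Or.inr ⟨j, by omega, h2, h3, h4, h5⟩
    · -- not divisible: both sides unchanged
      rw [recipeStepA_id nums k t sa (fun h => hc h.1),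
        recipeStepB_id nums best _ pk t (fun h => hc h.1)]
      refine ⟨hL1, hL2, hoff, hck, ?_, hmax⟩
      rcases hgood with h | ⟨j, hj, h2, h3, h4, h5⟩
      · exact Or.inl h
      · exact Or.inr ⟨j, by omega, h2, h3, h4, h5⟩

-- invariant after k outer iterations: A's (dp, prev, max_len, max_i) vs B's (best, ans)
def pvInv (nums : List Int) (k : Nat) (sa : List Int × List Int × Int × Nat)
    (sb : List (List Int) × List Int) : Prop :=
  sa.1.length = nums.length ∧ sa.2.1.length = nums.length ∧ sb.1.length = k ∧
  (∀ m, k ≤ m → m < nums.length → sa.1.getD m 0 = 1) ∧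
  (∀ m, m < k → sa.1.getD m 0 = ((sb.1.getD m []).length : Int) ∧
    pvGood nums sa.1 sa.2.1 sb.1 m) ∧
  1 ≤ sa.2.2.1 ∧
  (if k = 0 then sa.2.2.1 = 1 ∧ sa.2.2.2 = 0 ∧ sb.2 = []
   else sa.2.2.2 < k ∧ sb.2 = sb.1.getD sa.2.2.2 [] ∧ sa.2.2.1 = sa.1.getD sa.2.2.2 0 ∧
     ∀ m, m < k → sa.1.getD m 0 ≤ sa.2.2.1)

theorem pvOuter (nums : List Int) : ∀ k, k ≤ nums.length →
    pvInv nums k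
      ((List.range k).foldl (recipeOuterA nums)
        (List.replicate nums.length 1, List.replicate nums.length (-1), 1, 0))
      ((PySem.List.enumerate (nums.take k) 0).foldl (recipeOuterB nums) ([], [])) := by
  intro k
  induction k with
  | zero =>
    intro _
    unfold pvInv
    refine ⟨by simp, by simp, by simp, ?_, by omega, by simp, ?_⟩
    · intro m _ hm
      simp [List.getD, List.length_replicate, hm]
    · simp
  | succ k ih =>
    intro hk1
    have hkn : k < nums.length := hk1
    have IH := ih (le_of_lt hkn)
    unfold pvInv at IH
    set sa := (List.range k).foldl (recipeOuterA nums)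
      (List.replicate nums.length 1, List.replicate nums.length (-1), 1, 0) with hsa
    set sb := (PySem.List.enumerate (nums.take k) 0).foldl (recipeOuterB nums) ([], []) with hsb
    obtain ⟨hL1, hL2, hBL, htail, hper, hml1, hmax⟩ := IH
    -- unfold one step of each outer fold
    rw [List.range_succ, List.foldl_append, List.foldl_cons, List.foldl_nil, ← hsa]
    rw [pvTake_succ nums k hkn, PySem.List.enumerate_append]
    rw [List.foldl_append, ← hsb]
    have hlentake : (nums.take k).length = k := by simp [List.length_take]; omega
    have hgetk : nums[k] = nums.getD k 0 := by
      rw [List.getD, List.getElem?_eq_getElem hkn]; rfl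
    rw [hlentake]
    simp only [PySem.List.enumerate_cons, PySem.List.enumerate_nil, List.foldl_cons, List.foldl_nil]
    simp only [hgetk]
    -- the B step
    set pk := (List.range k).foldl (recipeStepB nums sb.1 (nums.getD k 0)) ((-1 : Int), (0 : Nat))
      with hpkdef
    set cur := if pk.1 ≥ 0 then sb.1.getD pk.1.toNat [] ++ [nums.getD k 0] else [nums.getD k 0]
      with hcurdef
    have hstep : recipeOuterB nums sb ((0 + (k : Int)), nums.getD k 0) =
        (sb.1 ++ [cur], if cur.length > sb.2.length then cur else sb.2) := by
      unfold recipeOuterB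
      simp only [Int.toNat_natCast, zero_add, ← hpkdef, ← hcurdef]
    rw [hstep]
    -- the A step via the inner invariant
    have hdpk : sa.1.getD k 0 = 1 := htail k le_rfl hkn
    have hInner := pvInner nums k sa.1 sa.2.1 sb.1 sa.2.2.1 sa.2.2.2 hkn hL1 hL2 hBL
      (fun m hm => (hper m hm).1) hdpk hml1 k le_rfl
    unfold pvInnerP at hInner
    rw [← hpkdef] at hInner
    have hOA : recipeOuterA nums sa k =
        (List.range k).foldl (recipeStepA nums k) (sa.1, sa.2.1, sa.2.2.1, sa.2.2.2) := rfl
    rw [hOA]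
    set sa' := (List.range k).foldl (recipeStepA nums k) (sa.1, sa.2.1, sa.2.2.1, sa.2.2.2)
      with hsa'
    obtain ⟨hL1', hL2', hoff, hckpk, hgoodpk, hmaxI⟩ := hInner
    -- translate the (pick, plen) facts into facts about the chain cur that Source B builds from them
    have hck : sa'.1.getD k 0 = (cur.length : Int) := by
      rcases hgoodpk with ⟨h1, hpkv⟩ | ⟨j, hj, hp1, hp2, _, _⟩
      · rw [hcurdef, hpkv, if_neg (by norm_num), h1]
        rfl
      · rw [hcurdef, if_pos (by rw [hp1]; exact Int.natCast_nonneg j), hckpk, hp1, hp2]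
        simp
    have hgood : (sa'.1.getD k 0 = 1 ∧ cur = [nums.getD k 0]) ∨
        (∃ j, j < k ∧ sa'.2.1.getD k 0 = (j : Int) ∧ sa'.1.getD k 0 = sa.1.getD j 0 + 1 ∧
          cur = sb.1.getD j [] ++ [nums.getD k 0]) := by
      rcases hgoodpk with ⟨h1, hpkv⟩ | ⟨j, hj, hp1, hp2, hp3, hp4⟩
      · exact Or.inl ⟨h1, by rw [hcurdef, hpkv, if_neg (by norm_num)]⟩
      · refine Or.inr ⟨j, hj, hp3, hp4, ?_⟩
        rw [hcurdef, if_pos (by rw [hp1]; exact Int.natCast_nonneg j), hp1, Int.toNat_natCast]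
    have hcurne : cur ≠ [] := by
      rcases hgood with ⟨_, hb⟩ | ⟨j, _, _, _, hb⟩ <;> rw [hb] <;> simp
    have hbk : (sb.1 ++ [cur]).getD k [] = cur := by
      have h := pvGetD_append_len sb.1 cur []
      rwa [hBL] at h
    have hbapp : ∀ i : Nat, i < k → (sb.1 ++ [cur]).getD i [] = sb.1.getD i [] := by
      intro i hi
      exact pvGetD_append_lt sb.1 [cur] i [] (by omega)
    unfold pvInv
    refine ⟨hL1', hL2', by simp [hBL], ?_, ?_, ?_, ?_⟩
    · -- tail unchanged above k
      intro m hm1 hm2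
      rw [(hoff m (by omega)).1]
      exact htail m (by omega) hm2
    · -- per-index invariant up to k+1
      intro m hm
      by_cases hmk : m = k
      · subst hmk
        constructor
        · rw [hck, hbk]
        · unfold pvGood
          rcases hgood with ⟨h1, hb⟩ | ⟨j, hj, h2, h3, hb⟩
          · exact Or.inl ⟨h1, by rw [hbk, hb]⟩
          · refine Or.inr ⟨j, hj, h2, ?_, ?_⟩
            · rw [h3, (hoff j (by omega)).1]
            · rw [hbk, hbapp j (by omega), hb]
      · have hmk' : m < k := by omega
        obtain ⟨hl, hgd⟩ := hper m hmk'
        have hbm : (sb.1 ++ [cur]).getD m [] = sb.1.getD m [] := hbapp m hmk'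
        constructor
        · rw [(hoff m hmk).1, hbm]; exact hl
        · unfold pvGood at hgd ⊢
          rcases hgd with ⟨h1, hb⟩ | ⟨j, hj, h2, h3, hb⟩
          · exact Or.inl ⟨by rw [(hoff m hmk).1]; exact h1, by rw [hbm]; exact hb⟩
          · refine Or.inr ⟨j, hj, ?_, ?_, ?_⟩
            · rw [(hoff m hmk).2]; exact h2
            · rw [(hoff m hmk).1, (hoff j (by omega)).1]; exact h3
            · rw [hbm, hbapp j (by omega), hb]
    · -- 1 ≤ new max_len
      rcases (Classical.em (sa'.1.getD k 0 > sa.2.2.1)) with h1 | h1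
      · rw [if_pos h1] at hmaxI; omega
      · rw [if_neg h1] at hmaxI; omega
    · -- max clause for k+1
      rw [if_neg (Nat.succ_ne_zero k)]
      rcases (Classical.em (sa'.1.getD k 0 > sa.2.2.1)) with h1 | h1
      · -- the maximum moved to index k (both sides)
        obtain ⟨hmlv, hmiv⟩ := (if_pos h1 ▸ hmaxI : _)
        have hcurgt : cur.length > sb.2.length := by
          by_cases hk0 : k = 0
          · obtain ⟨_, _, hansnil⟩ := (if_pos hk0 ▸ hmax : _)
            rw [hansnil]
            exact List.length_pos_iff.mpr hcurne
          · obtain ⟨hmi, hans, hmleq, _⟩ := (if_neg hk0 ▸ hmax : _)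
            have hlenml : (sb.2.length : Int) = sa.2.2.1 := by
              rw [hans, hmleq, (hper sa.2.2.2 hmi).1]
            have : (sb.2.length : Int) < (cur.length : Int) := by
              rw [hlenml, ← hck]; exact h1
            exact_mod_cast this
        refine ⟨by omega, ?_, ?_, ?_⟩
        · rw [if_pos hcurgt, hmiv, hbk]
        · rw [hmlv, hmiv]
        · intro m hm
          by_cases hmk : m = k
          · subst hmk
            rw [hmlv]
          · have hm' : m < k := by omega
            rw [(hoff m hmk).1, hmlv]
            by_cases hk0 : k = 0
            · omega
            · obtain ⟨_, _, _, hbound⟩ := (if_neg hk0 ▸ hmax : _)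
              have := hbound m hm'
              omega
      · -- the maximum is unchanged (both sides)
        obtain ⟨hmlv, hmiv⟩ := (if_neg h1 ▸ hmaxI : _)
        by_cases hk0 : k = 0
        · obtain ⟨hml, hmi, hansnil⟩ := (if_pos hk0 ▸ hmax : _)
          have hcl1 : (cur.length : Int) = 1 := by
            rw [← hck]
            have : sa'.1.getD k 0 ≤ sa.2.2.1 := by omega
            rw [hml] at this
            omega
          have hcurgt : cur.length > sb.2.length := by
            rw [hansnil]
            exact List.length_pos_iff.mpr hcurne
          have hbnil : sb.1 = [] := List.length_eq_zero_iff.mp (by omega)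
          refine ⟨by omega, ?_, ?_, ?_⟩
          · rw [if_pos hcurgt, hmiv, hmi, hbnil]
            rfl
          · rw [hmlv, hmiv, hmi, hml, ← hk0, hck, hcl1]
          · intro m hm
            have hmk : m = k := by omega
            subst hmk
            rw [hck, hmlv, hml, hcl1]
        · obtain ⟨hmi, hans, hmleq, hbound⟩ := (if_neg hk0 ▸ hmax : _)
          have hlenml : (sb.2.length : Int) = sa.2.2.1 := by
            rw [hans, hmleq, (hper sa.2.2.2 hmi).1]
          have hcurle : ¬ cur.length > sb.2.length := by
            intro hgt
            apply h1
            rw [hck, ← hlenml]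
            exact_mod_cast hgt
          refine ⟨by omega, ?_, ?_, ?_⟩
          · rw [if_neg hcurle, hmiv, hbapp sa.2.2.2 (by omega), hans]
          · rw [hmlv, hmiv, hmleq, (hoff sa.2.2.2 (by omega)).1]
          · intro m hm
            by_cases hmk : m = k
            · subst hmk
              rw [hmlv]
              omega
            · rw [(hoff m hmk).1, hmlv]
              exact hbound m (by omega)

-- ===== VERDICT (by name: the statement is the Claim_ definition above) =====
theorem recipe_spec : Claim_equal_recipe := by
  unfold Claim_equal_recipe
  intro nums _ _
  unfold Spec_recipe
  by_cases hn : nums.length = 0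
  · have : nums = [] := List.length_eq_zero_iff.mp hn
    subst this
    rfl
  · unfold recipe
    rw [if_neg hn]
    have hInv := pvOuter nums nums.length le_rfl
    rw [List.take_length] at hInv
    unfold pvInv at hInv
    set sa := (List.range nums.length).foldl (recipeOuterA nums)
      (List.replicate nums.length 1, List.replicate nums.length (-1), 1, 0) with hsa
    set sb := (PySem.List.enumerate nums 0).foldl (recipeOuterB nums) ([], []) with hsb
    obtain ⟨hL1, hL2, hBL, _, hper, _, hmax⟩ := hInv
    obtain ⟨hmi, hans, _, _⟩ := (if_neg hn ▸ hmax : _)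
    have : recipe_alt nums = sb.2 := rfl
    rw [this]
    rw [pvRebuild_eq nums sa.1 sa.2.1 sb.1
      (fun m hm => hper m (by omega)) nums.length sa.2.2.2 [] (by omega) hmi]
    rw [List.append_nil, hans]
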